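-- pv_equiv track=rewrite | github.com/daygle/daygle-server-manager | api/src/ssh_updater.py | clean_command_output
-- ===== SOURCE A (Python) =====
-- REDACTION_PLACEHOLDER = "[REDACTED]"
--
-- def clean_command_output(package_manager: str, output: str) -> str:
--     normalized_output = output.replace("\r", "\n")
--
--     cleaned_lines: list[str] = []
--     previous_blank = False
--
--     for raw_line in normalized_output.splitlines():
--         line = raw_line.rstrip()
--         stripped = line.strip()
--
--         if not stripped:
--             if cleaned_lines and not previous_blank:
--                 cleaned_lines.append("")
--             previous_blank = True
--             continue
--
--         if should_skip_output_line(package_manager, stripped):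
--             continue
--
--         cleaned_lines.append(line)
--         previous_blank = False
--
--     return "\n".join(cleaned_lines).strip()
--
-- def should_skip_output_line(package_manager: str, line: str) -> bool:
--     if line == REDACTION_PLACEHOLDER:
--         return True
--
--     return False
-- ===== SOURCE B (Python) =====
-- REDACTION_PLACEHOLDER = "[REDACTED]"
--
-- def clean_command_output(package_manager: str, output: str) -> str:
--     lines = [l.rstrip() for l in output.replace("\r", "\n").splitlines()
--              if l.strip() != REDACTION_PLACEHOLDER]
--     kept = [l for prev, l in zip([""] + lines, lines) if l or prev]
--     return "\n".join(kept).strip()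
-- ===== Notes on version B (the rewrite author's own statement) =====
-- stated objective: idiomatic
-- what changed: Replaces A's stateful loop (cleaned_lines accumulator plus previous_blank flag) with a declarative pipeline: a filter/map comprehension drops redacted lines and rstrips, then a zip of the list with its own shifted copy keeps a blank line only when the preceding kept line is non-blank.
import Mathlib
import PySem

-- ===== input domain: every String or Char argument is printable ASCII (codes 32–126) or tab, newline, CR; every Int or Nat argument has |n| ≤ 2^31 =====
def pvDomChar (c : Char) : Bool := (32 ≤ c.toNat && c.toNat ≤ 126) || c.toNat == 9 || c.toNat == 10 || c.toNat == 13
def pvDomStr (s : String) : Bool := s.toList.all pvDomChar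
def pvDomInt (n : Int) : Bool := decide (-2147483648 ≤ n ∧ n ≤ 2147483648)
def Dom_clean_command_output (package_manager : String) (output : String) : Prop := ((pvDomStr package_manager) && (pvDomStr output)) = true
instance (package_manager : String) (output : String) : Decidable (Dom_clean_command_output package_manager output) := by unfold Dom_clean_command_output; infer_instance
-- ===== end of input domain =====

-- B replaces A's previous_blank state machine by a filter/map pipeline plus a zip-with-shifted-list
-- comprehension that keeps a blank only when the preceding kept line is non-blank (objective: idiomatic).


-- ===== PORT A =====
def should_skip_output_line (package_manager : String) (line : String) : Bool :=
  if line = "[REDACTED]" then true else false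

-- the body of A's for-loop over splitlines, state = (cleaned_lines, previous_blank)
def pvLoopA (package_manager : String) (st : List String × Bool) (raw_line : String) : List String × Bool :=
  let line := PySem.Str.rstrip raw_line
  let stripped := PySem.Str.strip line
  if stripped = "" then
    (if st.1 ≠ [] ∧ st.2 = false then st.1 ++ [""] else st.1, true)
  else if should_skip_output_line package_manager stripped then st
  else (st.1 ++ [line], false)

def clean_command_output (package_manager : String) (output : String) : String :=
  let normalized_output := PySem.Str.replace output "\r" "\n"
  let r := (PySem.Str.splitlines normalized_output).foldl (pvLoopA package_manager) ([], false)
  PySem.Str.strip (PySem.Str.join "\n" r.1)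

-- ===== PORT B =====
def clean_command_output_alt (package_manager : String) (output : String) : String :=
  let lines := ((PySem.Str.splitlines (PySem.Str.replace output "\r" "\n")).filter
      (fun l => PySem.Str.strip l != "[REDACTED]")).map PySem.Str.rstrip
  let kept := ((("" :: lines).zip lines).filter (fun p => (p.2 != "") || (p.1 != ""))).map Prod.snd
  PySem.Str.strip (PySem.Str.join "\n" kept)

-- ===== PRECONDITION & SPEC =====
def Spec_clean_command_output (package_manager : String) (output : String) (out : String) : Prop := out = clean_command_output_alt package_manager output
instance (package_manager : String) (output : String) (out : String) : Decidable (Spec_clean_command_output package_manager output out) := by unfold Spec_clean_command_output; infer_instance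

-- ===== CLAIM (what is proved, stated in full; the proofs are below) =====
def Claim_equal_clean_command_output : Prop := ∀ (package_manager : String) (output : String), Dom_clean_command_output package_manager output → Spec_clean_command_output package_manager output (clean_command_output package_manager output)

-- ===== LEMMAS AND PROOFS =====

-- collapse with explicit previous line: the common shape both pipelines reduce to
def pvZipc : String → List String → List String
  | _, [] => []
  | prev, l :: t => if l ≠ "" ∨ prev ≠ "" then l :: pvZipc l t else pvZipc l t

theorem pvRstrip_eq_nil_iff (cs : List Char) :
    PySem.Chars.rstrip cs = [] ↔ ∀ c ∈ cs, PySem.Chars.isspace c := by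
  simp [PySem.Chars.rstrip, List.dropWhile_eq_nil_iff]

theorem pvLstrip_eq_nil_iff (cs : List Char) :
    PySem.Chars.lstrip cs = [] ↔ ∀ c ∈ cs, PySem.Chars.isspace c := by
  simp [PySem.Chars.lstrip, List.dropWhile_eq_nil_iff]

theorem pvRstrip_cons (c : Char) (cs : List Char) :
    PySem.Chars.rstrip (c :: cs) =
      if PySem.Chars.rstrip cs = [] then
        (if PySem.Chars.isspace c then [] else [c])
      else c :: PySem.Chars.rstrip cs := by
  simp only [PySem.Chars.rstrip, List.reverse_cons, List.dropWhile_append]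
  by_cases h : List.dropWhile PySem.Chars.isspace cs.reverse = []
  · simp [h, List.dropWhile_cons]
    by_cases hc : PySem.Chars.isspace c <;> simp [hc]
  · simp [h, List.isEmpty_iff, List.reverse_eq_nil_iff]

theorem pvRstrip_idem (cs : List Char) :
    PySem.Chars.rstrip (PySem.Chars.rstrip cs) = PySem.Chars.rstrip cs := by
  simp [PySem.Chars.rstrip, List.dropWhile_idempotent]

theorem pvComm (cs : List Char) :
    PySem.Chars.lstrip (PySem.Chars.rstrip cs) = PySem.Chars.rstrip (PySem.Chars.lstrip cs) := by
  induction cs with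
  | nil => rfl
  | cons c t ih =>
    by_cases hc : PySem.Chars.isspace c
    · by_cases ht : PySem.Chars.rstrip t = []
      · have hl : PySem.Chars.lstrip t = [] := by
          rw [pvLstrip_eq_nil_iff]; exact (pvRstrip_eq_nil_iff t).mp ht
        have e1 : PySem.Chars.rstrip (c :: t) = [] := by simp [pvRstrip_cons, ht, hc]
        have e2 : PySem.Chars.lstrip (c :: t) = [] := by
          simp only [PySem.Chars.lstrip, List.dropWhile_cons, hc, if_true]
          exact hl
        rw [e1, e2]; rfl
      · rw [pvRstrip_cons, if_neg ht]
        have e1 : PySem.Chars.lstrip (c :: PySem.Chars.rstrip t)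
            = PySem.Chars.lstrip (PySem.Chars.rstrip t) := by
          simp [PySem.Chars.lstrip, List.dropWhile_cons, hc]
        have e2 : PySem.Chars.lstrip (c :: t) = PySem.Chars.lstrip t := by
          simp [PySem.Chars.lstrip, List.dropWhile_cons, hc]
        rw [e1, e2, ih]
    · have hl : PySem.Chars.lstrip (c :: t) = c :: t := by
        simp [PySem.Chars.lstrip, List.dropWhile_cons, hc]
      rw [hl]
      by_cases ht : PySem.Chars.rstrip t = []
      · rw [pvRstrip_cons, if_pos ht, if_neg (by simp [hc])]
        simp [PySem.Chars.lstrip, List.dropWhile_cons, hc]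
      · rw [pvRstrip_cons, if_neg ht]
        simp [PySem.Chars.lstrip, List.dropWhile_cons, hc]

theorem pvStripChars_rstrip (cs : List Char) :
    PySem.Chars.strip (PySem.Chars.rstrip cs) = PySem.Chars.strip cs := by
  simp only [PySem.Chars.strip]
  rw [pvComm, pvRstrip_idem]

theorem pvStripChars_nil (cs : List Char) (h : PySem.Chars.strip cs = []) :
    PySem.Chars.rstrip cs = [] := by
  rw [pvRstrip_eq_nil_iff]
  simp only [PySem.Chars.strip] at h
  intro c hc
  have hall : ∀ x ∈ PySem.Chars.lstrip cs, PySem.Chars.isspace x := (pvRstrip_eq_nil_iff _).mp h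
  have hls : PySem.Chars.lstrip cs = [] := by
    by_contra hne
    have := List.head_dropWhile_not PySem.Chars.isspace (l := cs) (by simpa [PySem.Chars.lstrip] using hne)
    have hmem := List.head_mem (l := PySem.Chars.lstrip cs) (by simpa [PySem.Chars.lstrip] using hne)
    simp only [PySem.Chars.lstrip] at *
    exact absurd (hall _ hmem) (by simp [this])
  exact (pvLstrip_eq_nil_iff cs).mp hls c hc

-- String-level versions
theorem pvStrip_rstrip (s : String) :
    PySem.Str.strip (PySem.Str.rstrip s) = PySem.Str.strip s := by
  apply String.toList_inj.mp
  simp [PySem.Str.toList_strip, PySem.Str.toList_rstrip, pvStripChars_rstrip]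

theorem pvStrip_nil (s : String) (h : PySem.Str.strip s = "") :
    PySem.Str.rstrip s = "" := by
  apply String.toList_inj.mp
  have h' : (PySem.Str.strip s).toList = [] := by rw [h]; rfl
  rw [PySem.Str.toList_strip] at h'
  simpa [PySem.Str.toList_rstrip] using pvStripChars_nil s.toList h'

theorem pvStrip_empty : PySem.Str.strip "" = "" := by decide

-- B's zip/filter comprehension computes pvZipc
theorem pvZB (lines : List String) : ∀ prev : String,
    (((prev :: lines).zip lines).filter (fun p => (p.2 != "") || (p.1 != ""))).map Prod.snd
      = pvZipc prev lines := by
  induction lines with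
  | nil => intro prev; rfl
  | cons l t ih =>
    intro prev
    simp only [List.zip_cons_cons, List.filter_cons, pvZipc]
    by_cases h : l ≠ "" ∨ prev ≠ ""
    · rw [if_pos h]
      have : ((l != "") || (prev != "")) = true := by
        rcases h with h | h <;> simp [h]
      simp only [this, if_pos]
      simp [ih l]
    · rw [if_neg h]
      push_neg at h
      simp only [h.1, h.2, bne_self_eq_false, Bool.or_self, Bool.false_eq_true, if_false]
      simpa [h.1] using ih l

-- A's fold over the raw lines computes pvZipc of B's filtered/rstripped lines
theorem pvFold (package_manager : String) (ls : List String) :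
    ∀ (acc : List String) (prev : Bool) (c : String),
    (prev = true → c = "") → (prev = false → (c = "" ↔ acc = [])) →
    (ls.foldl (pvLoopA package_manager) (acc, prev)).1
      = acc ++ pvZipc c ((ls.filter (fun l => PySem.Str.strip l != "[REDACTED]")).map PySem.Str.rstrip) := by
  induction ls with
  | nil => intro acc prev c _ _; simp [pvZipc]
  | cons raw t ih =>
    intro acc prev c h1 h2
    have hsr : PySem.Str.strip (PySem.Str.rstrip raw) = PySem.Str.strip raw := pvStrip_rstrip raw
    by_cases h0 : PySem.Str.strip raw = ""
    · -- blank line: kept by B's filter as "", A's branch 1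
      have hl : PySem.Str.rstrip raw = "" := pvStrip_nil raw h0
      have hkeep : (PySem.Str.strip raw != "[REDACTED]") = true := by rw [h0]; decide
      simp only [List.foldl_cons, List.filter_cons, hkeep, if_pos, List.map_cons, hl]
      have hstriped : PySem.Str.strip (PySem.Str.rstrip raw) = "" := by rw [hsr]; exact h0
      have hstep : pvLoopA package_manager (acc, prev) raw
          = (if acc ≠ [] ∧ prev = false then acc ++ [""] else acc, true) := by
        simp [pvLoopA, hl, pvStrip_empty]
      rw [hstep]
      by_cases hap : acc ≠ [] ∧ prev = false
      · have hc : c ≠ "" := fun hce => hap.1 ((h2 hap.2).mp hce)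
        rw [if_pos hap]
        rw [ih (acc ++ [""]) true "" (fun _ => rfl) (by simp)]
        simp [pvZipc, hc]
      · have hc : c = "" := by
          by_cases hp : prev = true
          · exact h1 hp
          · have hpf : prev = false := by
              cases prev with
              | false => rfl
              | true => exact absurd rfl hp
            have hacc : acc = [] := by
              rcases not_and_or.mp hap with h | h
              · simpa using h
              · exact absurd hpf h
            exact (h2 hpf).mpr hacc
        rw [if_neg hap]
        rw [ih acc true "" (fun _ => rfl) (by simp)]
        simp [pvZipc, hc]
    · by_cases hR : PySem.Str.strip raw = "[REDACTED]"
      · -- redacted line: dropped by B, skipped by A (state unchanged)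
        have hdrop : (PySem.Str.strip raw != "[REDACTED]") = false := by rw [hR]; decide
        have hstep : pvLoopA package_manager (acc, prev) raw = (acc, prev) := by
          simp [pvLoopA, hsr, h0, should_skip_output_line, hR]
        simp only [List.foldl_cons, List.filter_cons, hdrop, hstep]
        simp only [Bool.false_eq_true, if_false]
        exact ih acc prev c h1 h2
      · -- content line
        have hkeep : (PySem.Str.strip raw != "[REDACTED]") = true := by simp [hR]
        have hlne : PySem.Str.rstrip raw ≠ "" := by
          intro he; rw [he] at hsr; rw [pvStrip_empty] at hsr; exact h0 hsr.symm
        have hstep : pvLoopA package_manager (acc, prev) raw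
            = (acc ++ [PySem.Str.rstrip raw], false) := by
          simp [pvLoopA, hsr, h0, should_skip_output_line, hR]
        simp only [List.foldl_cons, List.filter_cons, hkeep, if_pos, List.map_cons, hstep]
        rw [ih (acc ++ [PySem.Str.rstrip raw]) false (PySem.Str.rstrip raw)
          (by simp) (by simp [hlne])]
        simp [pvZipc, hlne]

-- ===== VERDICT (by name: the statement is the Claim_ definition above) =====
theorem clean_command_output_spec : Claim_equal_clean_command_output := by
  intro package_manager output _
  show clean_command_output package_manager output = clean_command_output_alt package_manager output
  unfold clean_command_output clean_command_output_alt
  simp only [pvZB, pvFold package_manager _ [] false "" (by simp) (by simp), List.nil_append]
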